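-- pv_equiv track=rewrite | github.com/daniel-reich/ubiquitous-fiesta | uKPc5faEzQkMwLYPP_19.py | end_corona
-- ===== SOURCE A (Python) =====
-- def end_corona(recovers, new_cases, active_cases):
--  cases=0
--  x=0
--  dni=0
--  cases=int(active_cases)+int(new_cases)-int(recovers)
--  x=cases
--  while cases>0:
--     x=cases
--     cases=int(x)+int(new_cases)-int(recovers)
--     dni+=1
--  return(int(dni)+1)
-- ===== SOURCE B (Python) =====
-- def end_corona(recovers, new_cases, active_cases):
--     cases = active_cases + new_cases - recovers
--     if cases <= 0:
--         return 1
--     return -(-cases // (recovers - new_cases)) + 1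
-- ===== Notes on version B (the rewrite author's own statement) =====
-- stated objective: simpler
-- what changed: replaced the step-by-step subtraction loop by a closed-form ceiling division of the initial net cases by the daily net decrease
import Mathlib
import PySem

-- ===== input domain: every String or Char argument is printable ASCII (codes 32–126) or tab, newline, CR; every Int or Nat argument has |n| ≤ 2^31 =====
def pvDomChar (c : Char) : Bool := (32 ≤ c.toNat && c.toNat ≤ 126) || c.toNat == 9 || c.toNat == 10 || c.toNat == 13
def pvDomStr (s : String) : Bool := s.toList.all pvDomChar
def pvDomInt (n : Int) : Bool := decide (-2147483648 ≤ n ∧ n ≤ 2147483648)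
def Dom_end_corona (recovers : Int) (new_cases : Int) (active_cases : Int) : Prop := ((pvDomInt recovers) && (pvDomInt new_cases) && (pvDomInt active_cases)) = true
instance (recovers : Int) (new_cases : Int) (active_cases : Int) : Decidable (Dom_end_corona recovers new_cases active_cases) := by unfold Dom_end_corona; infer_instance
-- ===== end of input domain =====

-- B replaces A's step-by-step subtraction loop by one closed-form ceiling division (simpler; loop-free).


-- ===== PORT A =====
-- A's while loop: while cases>0: cases = cases + new_cases - recovers; dni += 1.
-- The inner 'new_cases - recovers < 0' test is only a totality guard: when it fails and
-- cases > 0 the Python loop diverges (such inputs are excluded by Pre_end_corona).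
def end_corona_loop (recovers : Int) (new_cases : Int) (cases : Int) (dni : Int) : Int :=
  if 0 < cases then
    if new_cases - recovers < 0 then
      end_corona_loop recovers new_cases (cases + new_cases - recovers) (dni + 1)
    else dni + 1
  else dni + 1
termination_by cases.toNat
decreasing_by omega

def end_corona (recovers : Int) (new_cases : Int) (active_cases : Int) : Int :=
  end_corona_loop recovers new_cases (active_cases + new_cases - recovers) 0

-- ===== PORT B =====
def end_corona_alt (recovers : Int) (new_cases : Int) (active_cases : Int) : Int :=
  let cases := active_cases + new_cases - recovers
  if cases ≤ 0 then 1
  else -(PySem.Int.floordiv (-cases) (recovers - new_cases)) + 1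

-- ===== PRECONDITION & SPEC =====
-- Pre_ excludes exactly the inputs on which A's while loop never terminates
-- (initial cases positive while the net change new_cases - recovers is ≥ 0): A returns on no such input.
def Pre_end_corona (recovers : Int) (new_cases : Int) (active_cases : Int) : Prop :=
  active_cases + new_cases - recovers ≤ 0 ∨ new_cases - recovers < 0
instance (recovers : Int) (new_cases : Int) (active_cases : Int) : Decidable (Pre_end_corona recovers new_cases active_cases) := by unfold Pre_end_corona; infer_instance

def pvWitness_end_corona : Int × Int × Int := (5, 1, 10)

def Spec_end_corona (recovers : Int) (new_cases : Int) (active_cases : Int) (out : Int) : Prop := out = end_corona_alt recovers new_cases active_cases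
instance (recovers : Int) (new_cases : Int) (active_cases : Int) (out : Int) : Decidable (Spec_end_corona recovers new_cases active_cases out) := by unfold Spec_end_corona; infer_instance

-- ===== CLAIM (what is proved, stated in full; the proofs are below) =====
def Claim_equal_end_corona : Prop := ∀ (recovers : Int) (new_cases : Int) (active_cases : Int), Dom_end_corona recovers new_cases active_cases → Pre_end_corona recovers new_cases active_cases → Spec_end_corona recovers new_cases active_cases (end_corona recovers new_cases active_cases)

-- ===== LEMMAS AND PROOFS =====

-- Closed form of A's loop when the net change is strictly negative.
lemma end_corona_loop_eq (recovers new_cases : Int) (h : new_cases - recovers < 0) :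
    ∀ (k : Nat) (cases dni : Int), cases.toNat ≤ k →
      end_corona_loop recovers new_cases cases dni =
        dni + (if cases ≤ 0 then 1
               else -(PySem.Int.floordiv (-cases) (recovers - new_cases)) + 1) := by
  intro k
  induction k with
  | zero =>
    intro cases dni hk
    have hc : ¬ 0 < cases := by omega
    have hc2 : cases ≤ 0 := by omega
    rw [end_corona_loop]
    simp [hc, hc2]
  | succ k ih =>
    intro cases dni hk
    by_cases hc : 0 < cases
    · rw [end_corona_loop]
      simp only [hc, h, if_true]
      rw [ih (cases + new_cases - recovers) (dni + 1) (by omega)]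
      have hb : 0 < recovers - new_cases := by omega
      by_cases h2 : cases + new_cases - recovers ≤ 0
      · have hone : -(PySem.Int.floordiv (-cases) (recovers - new_cases)) = 1 := by
          rw [PySem.Int.neg_floordiv_neg_eq_iff_of_pos hb]
          constructor <;> nlinarith
        simp [h2, hone]
        omega
      · set b := recovers - new_cases with hbdef
        set q := -(PySem.Int.floordiv (-(cases + new_cases - recovers)) b) with hq
        have hqc : (q - 1) * b < cases + new_cases - recovers ∧ cases + new_cases - recovers ≤ q * b := by
          rw [← PySem.Int.neg_floordiv_neg_eq_iff_of_pos hb]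
        have : -(PySem.Int.floordiv (-cases) b) = q + 1 := by
          rw [PySem.Int.neg_floordiv_neg_eq_iff_of_pos hb]
          constructor <;> nlinarith [hqc.1, hqc.2]
        simp [h2, this]
        omega
    · have hc2 : cases ≤ 0 := by omega
      rw [end_corona_loop]
      simp [hc, hc2]

-- ===== VERDICT (by name: the statement is the Claim_ definition above) =====
theorem end_corona_spec : Claim_equal_end_corona := by
  intro recovers new_cases active_cases _ hpre
  unfold Spec_end_corona end_corona end_corona_alt
  by_cases h0 : active_cases + new_cases - recovers ≤ 0
  · rw [end_corona_loop]
    simp [h0]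
    omega
  · have h : new_cases - recovers < 0 := by
      rcases hpre with h | h
      · omega
      · exact h
    rw [end_corona_loop_eq recovers new_cases h (active_cases + new_cases - recovers).toNat _ _ le_rfl]
    simp [h0]
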